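-- pv_equiv track=rewrite | github.com/oshea00/euler | Squares.py | isSquarePossibleAt
-- ===== SOURCE A (Python) =====
-- cols=5
--
-- def getDirectionOffset(dir,dist):
-- 	if dir == 1: # N
-- 		return (0,-dist)
-- 	if dir == 2: # W
-- 		return (-dist,0)
-- 	if dir == 3: # S
-- 		return (0,dist)
-- 	if dir == 4: # E
-- 		return (dist,0)
-- 	return (cols,cols)
--
-- def isInbounds(row,col,dist,dir):
-- 	coloff, rowoff = getDirectionOffset(dir,dist)
-- 	if not 0 <= row + rowoff < cols:
-- 		return False
-- 	if not 0 <= col + coloff < cols: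
-- 		return False
-- 	return True
--
-- def isSquarePossibleAt(row,col,size):
-- 	for dir in range(1,5):
-- 		coloff, rowoff = getDirectionOffset(dir,size)
-- 		if not isInbounds(row,col,size,dir):
-- 			return False
-- 		row += rowoff
-- 		col += coloff
-- 	return True
-- ===== SOURCE B (Python) =====
-- cols = 5
--
-- def isSquarePossibleAt(row, col, size):
--     return (0 <= row - size < cols and 0 <= row < cols
--             and 0 <= col - size < cols and 0 <= col < cols)
-- ===== Notes on version B (the rewrite author's own statement) =====
-- stated objective: simpler
-- what changed: Replaced the four-step direction walk (getDirectionOffset/isInbounds dispatch with mutating row/col) by a single closed-form check that the square's four corner coordinates row, row-size, col, col-size all lie in [0, cols).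
import Mathlib
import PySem

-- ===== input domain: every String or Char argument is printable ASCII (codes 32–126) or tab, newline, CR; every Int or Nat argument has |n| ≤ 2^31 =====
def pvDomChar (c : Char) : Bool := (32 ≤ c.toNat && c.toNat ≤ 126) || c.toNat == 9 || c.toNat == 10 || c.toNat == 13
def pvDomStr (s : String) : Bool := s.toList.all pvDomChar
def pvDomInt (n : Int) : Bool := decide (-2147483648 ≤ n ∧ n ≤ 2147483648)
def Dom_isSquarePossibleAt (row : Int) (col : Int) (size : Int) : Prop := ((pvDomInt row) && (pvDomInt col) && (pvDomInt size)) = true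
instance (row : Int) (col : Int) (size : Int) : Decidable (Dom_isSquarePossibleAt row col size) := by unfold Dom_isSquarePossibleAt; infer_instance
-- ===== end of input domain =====

-- B replaces A's four-step direction walk by one closed-form corner check (objective: simpler).

-- ===== PORT A =====
def pvCols : Int := 5

def getDirectionOffset (dir : Int) (dist : Int) : Int × Int :=
  if dir = 1 then (0, -dist)
  else if dir = 2 then (-dist, 0)
  else if dir = 3 then (0, dist)
  else if dir = 4 then (dist, 0)
  else (pvCols, pvCols)

def isInbounds (row : Int) (col : Int) (dist : Int) (dir : Int) : Bool :=
  let (coloff, rowoff) := getDirectionOffset dir dist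
  if ¬ (0 ≤ row + rowoff ∧ row + rowoff < pvCols) then false
  else if ¬ (0 ≤ col + coloff ∧ col + coloff < pvCols) then false
  else true

-- the 'for dir in range(1,5)' loop with early return, state (row, col)
def isSquareLoop (dirs : List Int) (row : Int) (col : Int) (size : Int) : Bool :=
  match dirs with
  | [] => true
  | d :: ds =>
    let (coloff, rowoff) := getDirectionOffset d size
    if ¬ isInbounds row col size d then false
    else isSquareLoop ds (row + rowoff) (col + coloff) size

def isSquarePossibleAt (row : Int) (col : Int) (size : Int) : Bool :=
  isSquareLoop (PySem.List.pyRange 1 5 1) row col size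

-- ===== PORT B =====
def isSquarePossibleAt_alt (row : Int) (col : Int) (size : Int) : Bool :=
  decide (0 ≤ row - size ∧ row - size < pvCols) && decide (0 ≤ row ∧ row < pvCols)
    && decide (0 ≤ col - size ∧ col - size < pvCols) && decide (0 ≤ col ∧ col < pvCols)

-- ===== PRECONDITION & SPEC =====
def Spec_isSquarePossibleAt (row : Int) (col : Int) (size : Int) (out : Bool) : Prop := out = isSquarePossibleAt_alt row col size
instance (row : Int) (col : Int) (size : Int) (out : Bool) : Decidable (Spec_isSquarePossibleAt row col size out) := by unfold Spec_isSquarePossibleAt; infer_instance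

-- ===== CLAIM (what is proved, stated in full; the proofs are below) =====
def Claim_equal_isSquarePossibleAt : Prop := ∀ (row : Int) (col : Int) (size : Int), Dom_isSquarePossibleAt row col size → Spec_isSquarePossibleAt row col size (isSquarePossibleAt row col size)

-- ===== LEMMAS AND PROOFS =====
theorem pyRange_1_5 : PySem.List.pyRange 1 5 1 = [1, 2, 3, 4] := by decide

-- ===== VERDICT (by name: the statement is the Claim_ definition above) =====
theorem isSquarePossibleAt_spec : Claim_equal_isSquarePossibleAt := by
  intro row col size _
  unfold Spec_isSquarePossibleAt
  simp only [isSquarePossibleAt, pyRange_1_5, isSquareLoop, isInbounds, getDirectionOffset,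
    isSquarePossibleAt_alt, pvCols]
  norm_num
  rw [Bool.eq_iff_iff]
  simp only [Bool.and_eq_true, Bool.not_eq_true', decide_eq_true_eq, decide_eq_false_iff_not]
  omega
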